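-- pv_equiv track=rewrite | github.com/ryuhaneul/ductor | ductor_bot/__main__.py | _parse_docker_subcommand
-- ===== SOURCE A (Python) =====
-- _DOCKER_SUBCOMMANDS = frozenset({"rebuild", "enable", "disable"})
--
-- def _parse_docker_subcommand(args: list[str]) -> str | None:
--     """Extract the subcommand after 'docker' from CLI args."""
--     found = False
--     for a in args:
--         if a.startswith("-"):
--             continue
--         if not found and a == "docker":
--             found = True
--             continue
--         if found:
--             return a if a in _DOCKER_SUBCOMMANDS else None
--     return None
-- ===== SOURCE B (Python) =====
-- _DOCKER_SUBCOMMANDS = frozenset({"rebuild", "enable", "disable"})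
--
-- def _parse_docker_subcommand(args):
--     """Extract the subcommand after 'docker' from CLI args (filter-then-index)."""
--     tokens = [a for a in args if not a.startswith("-")]
--     if "docker" in tokens:
--         i = tokens.index("docker")
--         if i + 1 < len(tokens):
--             nxt = tokens[i + 1]
--             return nxt if nxt in _DOCKER_SUBCOMMANDS else None
--     return None
-- ===== Notes on version B (the rewrite author's own statement) =====
-- stated objective: idiomatic
-- what changed: Replaced the stateful found-flag scan with a filter-then-index decomposition: build the list of non-flag tokens once, then locate 'docker' by index and read the following token.
import Mathlib
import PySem

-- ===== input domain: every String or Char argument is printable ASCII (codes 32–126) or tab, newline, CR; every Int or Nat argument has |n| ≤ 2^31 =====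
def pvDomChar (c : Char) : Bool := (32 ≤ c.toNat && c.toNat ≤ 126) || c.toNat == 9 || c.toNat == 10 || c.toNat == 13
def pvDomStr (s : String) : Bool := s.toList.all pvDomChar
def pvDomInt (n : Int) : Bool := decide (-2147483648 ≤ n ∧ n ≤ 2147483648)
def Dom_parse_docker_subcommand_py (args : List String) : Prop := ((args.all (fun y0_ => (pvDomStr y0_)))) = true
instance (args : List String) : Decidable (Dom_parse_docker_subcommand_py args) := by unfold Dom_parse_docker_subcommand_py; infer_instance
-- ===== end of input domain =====

-- B replaces A's stateful found-flag scan by a filter-then-index decomposition (same cost, plainer shape).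

-- module constant _DOCKER_SUBCOMMANDS (frozenset used only for membership)
def pvDockerSubcommands : List String := ["rebuild", "enable", "disable"]

-- ===== PORT A =====
-- A's for-loop with the 'found' flag, transcribed as structural recursion over args.
def pvGoA (found : Bool) (args : List String) : Option String :=
  match args with
  | [] => none
  | a :: rest =>
    if PySem.Str.startswith a "-" then pvGoA found rest
    else if !found && a == "docker" then pvGoA true rest
    else if found then (if pvDockerSubcommands.contains a then some a else none)
    else pvGoA found rest

def parse_docker_subcommand_py (args : List String) : Option String :=
  pvGoA false args

-- ===== PORT B =====
def parse_docker_subcommand_py_alt (args : List String) : Option String :=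
  let tokens := args.filter (fun a => !(PySem.Str.startswith a "-"))
  if tokens.contains "docker" then
    match PySem.List.index? tokens "docker" with
    | some i =>
      if i + 1 < tokens.length then
        let nxt := tokens.getD (i + 1) ""
        if pvDockerSubcommands.contains nxt then some nxt else none
      else none
    | none => none
  else none

-- ===== PRECONDITION & SPEC =====
def Spec_parse_docker_subcommand_py (args : List String) (out : Option String) : Prop := out = parse_docker_subcommand_py_alt args
instance (args : List String) (out : Option String) : Decidable (Spec_parse_docker_subcommand_py args out) := by unfold Spec_parse_docker_subcommand_py; infer_instance

-- ===== CLAIM (what is proved, stated in full; the proofs are below) =====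
def Claim_equal_parse_docker_subcommand_py : Prop := ∀ (args : List String), Dom_parse_docker_subcommand_py args → Spec_parse_docker_subcommand_py args (parse_docker_subcommand_py args)

-- ===== LEMMAS AND PROOFS =====

-- proof-side helpers: A's two loop modes, re-read as scans of the filtered token list
def pvHeadCheck (t : List String) : Option String :=
  match t with
  | [] => none
  | a :: _ => if pvDockerSubcommands.contains a then some a else none

def pvScan (t : List String) : Option String :=
  match t with
  | [] => none
  | a :: rest => if a == "docker" then pvHeadCheck rest else pvScan rest

lemma pvGoA_true (args : List String) :
    pvGoA true args = pvHeadCheck (args.filter (fun a => !(PySem.Str.startswith a "-"))) := by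
  induction args with
  | nil => rfl
  | cons a rest ih =>
    simp only [pvGoA, List.filter_cons]
    by_cases h : PySem.Chars.startswith a.toList ['-'] = true
    · simp [h, ih]
    · simp [h, pvHeadCheck]

lemma pvGoA_false (args : List String) :
    pvGoA false args = pvScan (args.filter (fun a => !(PySem.Str.startswith a "-"))) := by
  induction args with
  | nil => rfl
  | cons a rest ih =>
    simp only [pvGoA, List.filter_cons]
    by_cases h : PySem.Chars.startswith a.toList ['-'] = true
    · simp [h, ih]
    · by_cases hd : a = "docker"
      · simp [hd, pvScan, pvGoA_true,
          show PySem.Chars.startswith ['d','o','c','k','e','r'] ['-'] = false from by decide]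
      · simp [h, hd, pvScan, ih]

-- B on the token list equals pvScan
lemma pvScan_eq_alt_body (t : List String) :
    pvScan t =
      (if t.contains "docker" then
        match PySem.List.index? t "docker" with
        | some i =>
          if i + 1 < t.length then
            (if pvDockerSubcommands.contains (t.getD (i + 1) "") then some (t.getD (i + 1) "") else none)
          else none
        | none => none
      else none) := by
  induction t with
  | nil => rfl
  | cons a rest ih =>
    by_cases hd : a = "docker"
    · subst hd
      rw [PySem.List.index?_cons_self]
      simp only [pvScan, beq_self_eq_true, if_true, List.contains_cons, beq_self_eq_true,
        Bool.true_or, if_true]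
      cases rest with
      | nil => rfl
      | cons b r => simp [pvHeadCheck]
    · have hba : (a == "docker") = false := beq_eq_false_iff_ne.mpr hd
      have hcc : (a :: rest).contains "docker" = rest.contains "docker" := by
        simp only [List.contains_cons,
          show ("docker" == a) = false from beq_eq_false_iff_ne.mpr (fun he => hd he.symm),
          Bool.false_or]
      simp only [pvScan, hba, Bool.false_eq_true, if_false]
      rw [ih, hcc, PySem.List.index?_cons_of_ne rest hd]
      by_cases hc : rest.contains "docker" = true
      · simp only [hc, if_true]
        rcases h : PySem.List.index? rest "docker" with _ | i
        · rw [PySem.List.index?_eq_none_iff] at h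
          rw [List.contains_iff_mem] at hc
          exact absurd hc h
        · simp only [Option.map_some, List.length_cons]
          have hiff : i + 1 + 1 < rest.length + 1 ↔ i + 1 < rest.length := by omega
          simp [hiff]
      · have hm : "docker" ∉ rest := by simpa [List.contains_iff_mem] using hc
        simp [hm]

-- ===== VERDICT (by name: the statement is the Claim_ definition above) =====
theorem parse_docker_subcommand_py_spec : Claim_equal_parse_docker_subcommand_py := by
  intro args _
  show parse_docker_subcommand_py args = parse_docker_subcommand_py_alt args
  rw [parse_docker_subcommand_py, pvGoA_false, pvScan_eq_alt_body]
  rfl
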